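-- pv_equiv track=rewrite | github.com/Jorge-Bioinf/Contact_analysis_RNA | check_contacts.py | get_category_rows
-- ===== SOURCE A (Python) =====
-- from typing import Dict, List, Optional, Tuple, Any
--
-- def _clean_token(tok: Optional[str]) -> Optional[str]:
--     if tok is None:
--         return None
--     tok = tok.strip()
--     if tok in {"?", "."}:
--         return None
--     return tok
--
-- def get_loop_rows(loops: Dict[str, List[str]], prefix: str) -> List[Dict[str, Optional[str]]]:
--     cols = [k for k in loops if k.startswith(prefix)]
--     if not cols:
--         return []
--
--     lengths = {len(loops[c]) for c in cols}
--     if len(lengths) != 1: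
--         raise ValueError(f"Inconsistent loop lengths for prefix {prefix}")
--
--     nrows = lengths.pop()
--     rows: List[Dict[str, Optional[str]]] = []
--     for i in range(nrows):
--         row: Dict[str, Optional[str]] = {}
--         for col in cols:
--             row[col[len(prefix):]] = _clean_token(loops[col][i])
--         rows.append(row)
--     return rows
--
-- def get_category_rows(
--     loops: Dict[str, List[str]],
--     singles: Dict[str, str],
--     prefix: str,
-- ) -> List[Dict[str, Optional[str]]]:
--     """
--     Supports either:
--     - a looped category
--     - a single-row category encoded as item/value pairs
--     """
--     rows = get_loop_rows(loops, prefix)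
--     if rows:
--         return rows
--
--     items = {
--         key[len(prefix):]: _clean_token(value)
--         for key, value in singles.items()
--         if key.startswith(prefix)
--     }
--     if items:
--         return [items]
--
--     return []
-- ===== SOURCE B (Python) =====
-- from typing import Dict, List, Optional
--
--
-- def _clean_token(tok: Optional[str]) -> Optional[str]:
--     if tok is None:
--         return None
--     tok = tok.strip()
--     if tok in {"?", "."}:
--         return None
--     return tok
--
--
-- def _rows_from_columns(cols):
--     # Fold over the columns: each column becomes a list of one-entry row dicts,
--     # and successive columns are merged elementwise into the accumulated rows.
--     rows = None
--     for key, cells in cols: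
--         col_rows = [{key: _clean_token(c)} for c in cells]
--         rows = col_rows if rows is None else [{**r, **cr} for r, cr in zip(rows, col_rows)]
--     return rows or []
--
--
-- def get_category_rows(
--     loops: Dict[str, List[str]],
--     singles: Dict[str, str],
--     prefix: str,
-- ) -> List[Dict[str, Optional[str]]]:
--     p = len(prefix)
--     cols = [(k[p:], cells) for k, cells in loops.items() if k.startswith(prefix)]
--     if cols:
--         if len({len(cells) for _, cells in cols}) != 1:
--             raise ValueError(f"Inconsistent loop lengths for prefix {prefix}")
--         rows = _rows_from_columns(cols)
--         if rows:
--             return rows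
--     scols = [(k[p:], [v]) for k, v in singles.items() if k.startswith(prefix)]
--     if scols:
--         return _rows_from_columns(scols)
--     return []
-- ===== Notes on version B (the rewrite author's own statement) =====
-- stated objective: alternative
-- what changed: Instead of A's index-driven double loop over precomputed row count, B folds over the columns themselves: each column becomes a list of one-entry row dicts and successive columns are merged elementwise into the accumulated row list, and the singles fallback reuses the same column-fold by encoding singles as length-1 columns.
import Mathlib
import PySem

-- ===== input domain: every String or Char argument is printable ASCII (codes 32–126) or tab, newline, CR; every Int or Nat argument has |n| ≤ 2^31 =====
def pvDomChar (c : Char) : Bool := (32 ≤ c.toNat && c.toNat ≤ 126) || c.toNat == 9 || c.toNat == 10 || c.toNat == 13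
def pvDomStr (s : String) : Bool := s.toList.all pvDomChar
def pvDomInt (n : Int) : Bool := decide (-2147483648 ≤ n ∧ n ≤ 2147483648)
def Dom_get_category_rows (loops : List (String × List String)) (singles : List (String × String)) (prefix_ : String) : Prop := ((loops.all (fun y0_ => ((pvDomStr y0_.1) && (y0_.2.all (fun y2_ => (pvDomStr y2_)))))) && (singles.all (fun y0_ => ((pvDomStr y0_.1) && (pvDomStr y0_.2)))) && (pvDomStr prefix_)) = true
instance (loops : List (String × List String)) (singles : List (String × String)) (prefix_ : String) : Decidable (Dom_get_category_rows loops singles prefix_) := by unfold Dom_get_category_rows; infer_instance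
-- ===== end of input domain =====

-- B builds the loop rows by folding over the COLUMNS: each column becomes a list of
-- one-entry row dicts, merged elementwise into the accumulated row list, and the singles
-- fallback reuses the same column-fold on length-1 columns; an alternative decomposition.
-- Pre_ excludes the inputs where both Pythons raise ValueError (inconsistent selected-column lengths).

-- ===== PORT A =====
-- shared helper: module-level _clean_token, identical in Source A and Source B
def pvClean (tok : Option String) : Option String :=
  match tok with
  | none => none
  | some t =>
    let t := PySem.Str.strip t
    if t = "?" ∨ t = "." then none else some t

-- port of Source A's singles dict-comprehension
def pvSinglesDict (singles : List (String × String)) (prefix_ : String) :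
    PySem.Dict String (Option String) :=
  (PySem.Dict.ofList singles).items.foldl
    (fun d kv =>
      if PySem.Str.startswith kv.1 prefix_ then
        d.insert (PySem.Str.slice kv.1 (some ((PySem.Str.len prefix_ : Int))) none)
          (pvClean (some kv.2))
      else d)
    PySem.Dict.empty

-- port of Source A's get_loop_rows (row-major: for each row index, build the row dict cell by cell)
def pvGetLoopRows (loops : List (String × List String)) (prefix_ : String) :
    List (PySem.Dict String (Option String)) :=
  let d : PySem.Dict String (List String) := PySem.Dict.ofList loops
  let cols := d.keys.filter (fun k => PySem.Str.startswith k prefix_)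
  if cols = [] then []
  else
    let lengths : PySem.Set Nat := PySem.Set.ofList (cols.map (fun c => (d.getD c []).length))
    -- here Source A raises ValueError if lengths has ≠ 1 element; those inputs are outside Pre_
    let nrows := lengths.headD 0
    (PySem.List.pyRange 0 (nrows : Int) 1).foldl
      (fun rows i =>
        rows ++ [cols.foldl
          (fun row col =>
            row.insert (PySem.Str.slice col (some ((PySem.Str.len prefix_ : Int))) none)
              (pvClean (PySem.List.pyGet? (d.getD col []) i)))
          PySem.Dict.empty])
      []

def get_category_rows (loops : List (String × List String)) (singles : List (String × String)) (prefix_ : String) : List (List (String × Option String)) :=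
  let rows := pvGetLoopRows loops prefix_
  if rows ≠ [] then rows.map PySem.Dict.items
  else
    let items := pvSinglesDict singles prefix_
    if items.items ≠ [] then [items.items] else []

-- ===== PORT B =====
-- one column -> a list of one-entry row dicts ([{key: _clean_token(c)} for c in cells])
def pvColRows (key : String) (cells : List String) : List (PySem.Dict String (Option String)) :=
  cells.map (fun c => (PySem.Dict.empty).insert key (pvClean (some c)))

-- elementwise merge of accumulated rows with a column's rows ([{**r, **cr} for r, cr in zip(rows, col_rows)])
def pvMergeRows (rs crs : List (PySem.Dict String (Option String))) :
    List (PySem.Dict String (Option String)) :=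
  (rs.zip crs).map (fun p => p.2.items.foldl (fun d kv => d.insert kv.1 kv.2) p.1)

-- port of Source B's _rows_from_columns: fold over the columns, rows accumulator starts at None
def pvRowsFromCols (cols : List (String × List String)) :
    List (PySem.Dict String (Option String)) :=
  (cols.foldl
    (fun acc kv =>
      match acc with
      | none => some (pvColRows kv.1 kv.2)
      | some rs => some (pvMergeRows rs (pvColRows kv.1 kv.2)))
    none).getD []

def get_category_rows_alt (loops : List (String × List String)) (singles : List (String × String)) (prefix_ : String) : List (List (String × Option String)) :=
  let p : Int := (PySem.Str.len prefix_ : Int)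
  let cols := ((PySem.Dict.ofList loops).items.filter (fun kv => PySem.Str.startswith kv.1 prefix_)).map
    (fun kv => (PySem.Str.slice kv.1 (some p) none, kv.2))
  -- here Source B raises ValueError if the selected columns' lengths differ; outside Pre_
  let rows := if cols ≠ [] then pvRowsFromCols cols else []
  if rows ≠ [] then rows.map PySem.Dict.items
  else
    let scols := ((PySem.Dict.ofList singles).items.filter (fun kv => PySem.Str.startswith kv.1 prefix_)).map
      (fun kv => (PySem.Str.slice kv.1 (some p) none, [kv.2]))
    if scols ≠ [] then (pvRowsFromCols scols).map PySem.Dict.items else []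

-- ===== PRECONDITION & SPEC =====
-- Pre_ excludes exactly the inputs on which both Pythons raise ValueError: two selected columns
-- (keys of the deduplicated loops dict starting with prefix_) of different lengths.
def Pre_get_category_rows (loops : List (String × List String)) (singles : List (String × String)) (prefix_ : String) : Prop :=
  ∀ p ∈ (PySem.Dict.ofList loops).items, ∀ q ∈ (PySem.Dict.ofList loops).items,
    PySem.Str.startswith p.1 prefix_ = true → PySem.Str.startswith q.1 prefix_ = true →
    p.2.length = q.2.length
instance (loops : List (String × List String)) (singles : List (String × String)) (prefix_ : String) : Decidable (Pre_get_category_rows loops singles prefix_) := by unfold Pre_get_category_rows; infer_instance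

def pvWitness_get_category_rows : (List (String × List String)) × (List (String × String)) × String :=
  ([("_a.id", ["1", "?"]), ("_a.val", [" x ", "."])], [("_a.note", "n")], "_a.")

def Spec_get_category_rows (loops : List (String × List String)) (singles : List (String × String)) (prefix_ : String) (out : List (List (String × Option String))) : Prop := out = get_category_rows_alt loops singles prefix_
instance (loops : List (String × List String)) (singles : List (String × String)) (prefix_ : String) (out : List (List (String × Option String))) : Decidable (Spec_get_category_rows loops singles prefix_ out) := by unfold Spec_get_category_rows; infer_instance

-- ===== CLAIM =====
def Claim_equal_get_category_rows : Prop := ∀ (loops : List (String × List String)) (singles : List (String × String)) (prefix_ : String), Dom_get_category_rows loops singles prefix_ → Pre_get_category_rows loops singles prefix_ → Spec_get_category_rows loops singles prefix_ (get_category_rows loops singles prefix_)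

-- ===== LEMMAS AND PROOFS =====

theorem pv_foldl_congr {α β : Type} (l : List α) (f g : β → α → β) (a : β)
    (h : ∀ b, ∀ x ∈ l, f b x = g b x) : l.foldl f a = l.foldl g a := by
  induction l generalizing a with
  | nil => rfl
  | cons x xs ih =>
    simp only [List.foldl_cons]
    rw [h a x (by simp)]
    exact ih _ (fun b y hy => h b y (by simp [hy]))

theorem pv_ofList_const (l : List (String × List String)) (a : Nat) (hne : l ≠ []) :
    PySem.Set.ofList (l.map (fun _ => a)) = [a] := by
  cases l with
  | nil => exact absurd rfl hne
  | cons x xs =>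
    simp only [List.map_cons]
    rw [PySem.Set.ofList_cons]
    have : PySem.Set.discard (PySem.Set.ofList (xs.map (fun _ => a))) a = [] := by
      rw [List.eq_nil_iff_forall_not_mem]
      intro y hy
      rw [PySem.Set.mem_discard] at hy
      obtain ⟨hy1, hy2⟩ := hy
      rw [PySem.Set.mem_ofList] at hy1
      obtain ⟨_, _, rfl⟩ := List.mem_map.1 hy1
      exact hy2 rfl
    rw [this]

-- {**r, **cr} with cr = {k: v} is r.insert k v
theorem pv_merge_singleton (r : PySem.Dict String (Option String)) (k : String) (v : Option String) :
    ((PySem.Dict.empty.insert k v).items).foldl (fun d kv => d.insert kv.1 kv.2) r = r.insert k v := by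
  rw [PySem.Dict.items_insert_of_not_contains _ _ (by simp)]
  rfl

-- a column's row list, indexed form
theorem pv_colRows_eq (k : String) (cells : List String) (n : Nat) (hc : cells.length = n) :
    pvColRows k cells =
      (List.range n).map (fun j => PySem.Dict.empty.insert k (pvClean cells[j]?)) := by
  subst hc
  apply List.ext_getElem (by simp [pvColRows])
  intro i h1 h2
  simp only [pvColRows, List.getElem_map, List.getElem_range]
  rw [List.getElem?_eq_getElem (by simpa [pvColRows] using h1)]

theorem pv_merge_eq (g : Nat → PySem.Dict String (Option String)) (k : String)
    (cells : List String) (n : Nat) (hc : cells.length = n) :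
    pvMergeRows ((List.range n).map g) (pvColRows k cells) =
      (List.range n).map (fun j => (g j).insert k (pvClean cells[j]?)) := by
  apply List.ext_getElem (by simp [pvMergeRows, pvColRows, hc])
  intro i h1 h2
  simp only [pvMergeRows, pvColRows, List.getElem_map, List.getElem_zip, List.getElem_range]
  rw [List.getElem?_eq_getElem (by simp at h2; omega), pv_merge_singleton]

-- per-row gather over the columns
def pvRowAt (cols : List (String × List String)) (init : PySem.Dict String (Option String))
    (j : Nat) : PySem.Dict String (Option String) :=
  cols.foldl (fun d kv => d.insert kv.1 (pvClean kv.2[j]?)) init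

theorem pv_fold_some (rest : List (String × List String)) (n : Nat)
    (hlen : ∀ kv ∈ rest, kv.2.length = n) (g : Nat → PySem.Dict String (Option String)) :
    rest.foldl
      (fun acc kv =>
        match acc with
        | none => some (pvColRows kv.1 kv.2)
        | some rs => some (pvMergeRows rs (pvColRows kv.1 kv.2)))
      (some ((List.range n).map g)) =
    some ((List.range n).map (fun j => pvRowAt rest (g j) j)) := by
  induction rest generalizing g with
  | nil => simp [pvRowAt]
  | cons kv rest ih =>
    simp only [List.foldl_cons]
    rw [pv_merge_eq g kv.1 kv.2 n (hlen kv (by simp))]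
    rw [ih (fun p hp => hlen p (by simp [hp])) (fun j => (g j).insert kv.1 (pvClean kv.2[j]?))]
    rfl

-- B's column fold, characterised row-wise
theorem pv_rowsFromCols_eq (cols : List (String × List String)) (n : Nat) (hne : cols ≠ [])
    (hlen : ∀ kv ∈ cols, kv.2.length = n) :
    pvRowsFromCols cols = (List.range n).map (fun j => pvRowAt cols PySem.Dict.empty j) := by
  cases cols with
  | nil => exact absurd rfl hne
  | cons kv rest =>
    unfold pvRowsFromCols
    simp only [List.foldl_cons]
    rw [pv_colRows_eq kv.1 kv.2 n (hlen kv (by simp))]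
    rw [pv_fold_some rest n (fun p hp => hlen p (by simp [hp]))]
    simp [pvRowAt]

-- a fold of conditional inserts is a fold of inserts over the filtered list
theorem pv_foldl_if_filter {α β : Type} (l : List α) (p : α → Bool) (f : β → α → β) (a : β) :
    l.foldl (fun b x => if p x then f b x else b) a = (l.filter p).foldl f a := by
  induction l generalizing a with
  | nil => rfl
  | cons x xs ih =>
    by_cases h : p x <;> simp [h, ih]

theorem pv_items_insert_ne_nil (d : PySem.Dict String (Option String)) (k : String)
    (v : Option String) : (d.insert k v).items ≠ [] := by
  rw [PySem.Dict.items_insert]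
  split_ifs with h
  · intro hnil
    rw [List.map_eq_nil_iff] at hnil
    rw [PySem.Dict.contains_iff_mem_keys] at h
    simp [PySem.Dict.keys, hnil] at h
  · simp

theorem pv_foldl_insert_ne_nil {α : Type} (l : List α) (key : α → String) (val : α → Option String)
    (d : PySem.Dict String (Option String)) (hd : d.items ≠ []) :
    (l.foldl (fun d x => d.insert (key x) (val x)) d).items ≠ [] := by
  induction l generalizing d with
  | nil => exact hd
  | cons x xs ih => exact ih _ (pv_items_insert_ne_nil d (key x) (val x))

-- A's loop rows = B's column fold, on the selected columns
theorem pv_loops_eq (loops : List (String × List String)) (prefix_ : String)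
    (hpre : Pre_get_category_rows loops [] prefix_) :
    pvGetLoopRows loops prefix_ =
      (if ((PySem.Dict.ofList loops).items.filter (fun kv => PySem.Str.startswith kv.1 prefix_)).map
          (fun kv => (PySem.Str.slice kv.1 (some ((PySem.Str.len prefix_ : Int))) none, kv.2)) ≠ [] then
        pvRowsFromCols (((PySem.Dict.ofList loops).items.filter (fun kv => PySem.Str.startswith kv.1 prefix_)).map
          (fun kv => (PySem.Str.slice kv.1 (some ((PySem.Str.len prefix_ : Int))) none, kv.2)))
      else []) := by
  simp only [pvGetLoopRows]
  have hkeys : (PySem.Dict.ofList loops).keys.filter (fun k => PySem.Str.startswith k prefix_) =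
      ((PySem.Dict.ofList loops).items.filter (fun kv => PySem.Str.startswith kv.1 prefix_)).map Prod.fst := by
    show ((PySem.Dict.ofList loops).items.map Prod.fst).filter (fun k => PySem.Str.startswith k prefix_) = _
    rw [List.filter_map]
    rfl
  rw [hkeys]
  cases hsel : (PySem.Dict.ofList loops).items.filter (fun kv => PySem.Str.startswith kv.1 prefix_) with
  | nil => simp
  | cons kv0 rest =>
    set d : PySem.Dict String (List String) := PySem.Dict.ofList loops with hd
    set sel : List (String × List String) := kv0 :: rest with hselc
    set n : Nat := kv0.2.length with hn
    have hselne : sel ≠ [] := by simp [hselc]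
    have hmemsel : ∀ kv ∈ sel, kv ∈ d.items ∧ PySem.Str.startswith kv.1 prefix_ = true := by
      intro kv hkv
      have : kv ∈ d.items.filter (fun kv => PySem.Str.startswith kv.1 prefix_) := by
        rw [hsel]; exact hkv
      simpa using List.mem_filter.1 this
    have hall : ∀ kv ∈ sel, kv.2.length = n := by
      intro kv hkv
      obtain ⟨hm, hs⟩ := hmemsel kv hkv
      obtain ⟨hm0, hs0⟩ := hmemsel kv0 (by simp [hselc])
      exact hpre kv hm kv0 hm0 hs hs0
    have hnodup : d.keys.Nodup := PySem.Dict.nodup_keys_ofList loops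
    have hgetD : ∀ kv ∈ sel, d.getD kv.1 [] = kv.2 := by
      intro kv hkv
      have h1 := (hmemsel kv hkv).1
      obtain ⟨k, v⟩ := kv
      exact PySem.Dict.getD_of_mem_items _ h1 hnodup []
    rw [if_neg (by simp : ¬(sel.map Prod.fst = [])), if_pos (by simp [hselc] : _ ≠ ([] : List (String × List String)))]
    -- A's lengths set is the singleton [n]
    have hlens : (sel.map Prod.fst).map (fun c => (d.getD c []).length) = sel.map (fun _ => n) := by
      rw [List.map_map]
      refine List.map_congr_left (fun kv hkv => ?_)
      simp only [Function.comp_apply]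
      rw [hgetD kv hkv, hall kv hkv]
    rw [hlens, pv_ofList_const sel n hselne]
    simp only [List.headD_cons]
    -- A's index loop becomes a map over List.range n
    rw [PySem.List.pyRange_one]
    have hrng : ((n : Int) - 0).toNat = n := by simp
    rw [hrng]
    rw [List.foldl_map, PySem.List.foldl_append_singleton_eq_map, List.nil_append]
    -- B's column fold becomes the same map
    have hblen : ∀ kv ∈ sel.map (fun kv => (PySem.Str.slice kv.1 (some ((PySem.Str.len prefix_ : Int))) none, kv.2)),
        kv.2.length = n := by
      intro kv hkv
      obtain ⟨kv0', hkv0, rfl⟩ := List.mem_map.1 hkv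
      exact hall kv0' hkv0
    rw [pv_rowsFromCols_eq _ n (by simp [hselc]) hblen]
    refine List.map_congr_left (fun j _ => ?_)
    simp only [pvRowAt, List.foldl_map]
    refine pv_foldl_congr sel _ _ _ (fun row kv hkv => ?_)
    rw [hgetD kv hkv]
    have : PySem.List.pyGet? kv.2 ((0 : Int) + (j : Int)) = kv.2[j]? := by
      rw [zero_add, PySem.List.pyGet?_natCast]
    rw [this]

-- A's singles dict = inserts over the filtered singles items
theorem pv_singles_eq (singles : List (String × String)) (prefix_ : String) :
    pvSinglesDict singles prefix_ =
      ((PySem.Dict.ofList singles).items.filter (fun kv => PySem.Str.startswith kv.1 prefix_)).foldl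
        (fun d kv => d.insert (PySem.Str.slice kv.1 (some ((PySem.Str.len prefix_ : Int))) none)
          (pvClean (some kv.2)))
        PySem.Dict.empty := by
  unfold pvSinglesDict
  rw [pv_foldl_if_filter]

-- A's singles fallback = B's singles fallback
theorem pv_singles_branch (singles : List (String × String)) (prefix_ : String) :
    (if (pvSinglesDict singles prefix_).items ≠ [] then [(pvSinglesDict singles prefix_).items] else []) =
      (if ((PySem.Dict.ofList singles).items.filter (fun kv => PySem.Str.startswith kv.1 prefix_)).map
          (fun kv => (PySem.Str.slice kv.1 (some ((PySem.Str.len prefix_ : Int))) none, [kv.2])) ≠ [] then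
        (pvRowsFromCols (((PySem.Dict.ofList singles).items.filter (fun kv => PySem.Str.startswith kv.1 prefix_)).map
          (fun kv => (PySem.Str.slice kv.1 (some ((PySem.Str.len prefix_ : Int))) none, [kv.2])))).map PySem.Dict.items
      else []) := by
  rw [pv_singles_eq]
  cases hs : (PySem.Dict.ofList singles).items.filter (fun kv => PySem.Str.startswith kv.1 prefix_) with
  | nil => simp [PySem.Dict.empty]
  | cons x xs =>
    have hne : ((x :: xs).map (fun kv => (PySem.Str.slice kv.1 (some ((PySem.Str.len prefix_ : Int))) none, [kv.2]))) ≠ [] := by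
      simp
    have hlen1 : ∀ kv ∈ (x :: xs).map (fun kv => (PySem.Str.slice kv.1 (some ((PySem.Str.len prefix_ : Int))) none, [kv.2])),
        kv.2.length = 1 := by
      intro kv hkv
      obtain ⟨kv0, _, rfl⟩ := List.mem_map.1 hkv
      rfl
    rw [if_pos hne, pv_rowsFromCols_eq _ 1 hne hlen1]
    have hrow : pvRowAt ((x :: xs).map (fun kv => (PySem.Str.slice kv.1 (some ((PySem.Str.len prefix_ : Int))) none, [kv.2]))) PySem.Dict.empty 0 =
        (x :: xs).foldl
          (fun d kv => d.insert (PySem.Str.slice kv.1 (some ((PySem.Str.len prefix_ : Int))) none) (pvClean (some kv.2)))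
          PySem.Dict.empty := by
      simp only [pvRowAt, List.foldl_map]
      rfl
    have hdne : ((x :: xs).foldl
        (fun d kv => d.insert (PySem.Str.slice kv.1 (some ((PySem.Str.len prefix_ : Int))) none) (pvClean (some kv.2)))
        PySem.Dict.empty).items ≠ [] := by
      simp only [List.foldl_cons]
      exact pv_foldl_insert_ne_nil xs _ _ _ (pv_items_insert_ne_nil _ _ _)
    rw [if_pos hdne, show List.range 1 = [0] from rfl]
    simp only [List.map_singleton]
    rw [hrow]

-- ===== VERDICT =====
theorem get_category_rows_spec : Claim_equal_get_category_rows := by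
  unfold Claim_equal_get_category_rows
  intro loops singles prefix_ _ hpre
  unfold Spec_get_category_rows get_category_rows get_category_rows_alt
  rw [pv_loops_eq loops prefix_ (fun p hp q hq h1 h2 => hpre p hp q hq h1 h2)]
  exact if_congr Iff.rfl rfl (pv_singles_branch singles prefix_)
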